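-- pv_equiv track=rewrite | github.com/KosGeny/ITMO_Optimization_Methods | LR-1/main.py | build_tableau
-- ===== SOURCE A (Python) =====
-- def build_tableau(sense, coeffs, constraints):
--     c = [ci for ci in coeffs]
--     constr = [([x for x in a], rel, b) for (a, rel, b) in constraints]
--
--     len_constrains = len(constr)
--     len_coeffs = len(c)
--     col_types = []
--     A_rows = []
--     b = []
--     for (a, rel, bi) in constr:
--         A_rows.append(a)
--         b.append(bi)
--     for i, (a, rel, bi) in enumerate(constr):
--         if rel == '<=':
--             for r in range(len_constrains):
--                 A_rows[r].append(1 if r == i else 0)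
--             col_types.append('slack')
--         elif rel == '>=':
--             for r in range(len_constrains):
--                 A_rows[r].append(-1 if r == i else 0)
--             col_types.append('surplus')
--             for r in range(len_constrains):
--                 A_rows[r].append(1 if r == i else 0)
--             col_types.append('art')
--         elif rel == '=':
--             for r in range(len_constrains):
--                 A_rows[r].append(1 if r == i else 0)
--             col_types.append('art')
--
--     col_types = ['orig'] * len_coeffs + col_types
--     c_ext = c + [0 for _ in range(len(col_types)-len_coeffs)]
--     return A_rows, b, c_ext, col_types
-- ===== SOURCE B (Python) =====
-- def build_tableau(sense, coeffs, constraints):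
--     # Block-diagonal construction: each constraint contributes a small block of
--     # extra columns ([1] slack, [-1,1] surplus+art, [1] art); prefix-sum offsets
--     # place it, and each row tail is zeros / own block / zeros by padding.
--     def block(rel):
--         if rel == '<=':
--             return ([1], ['slack'])
--         if rel == '>=':
--             return ([-1, 1], ['surplus', 'art'])
--         if rel == '=':
--             return ([1], ['art'])
--         return ([], [])
--     blocks = [block(rel) for (_, rel, _) in constraints]
--     offsets = [0]
--     for sgns, _ in blocks:
--         offsets.append(offsets[-1] + len(sgns))
--     total = offsets[-1]
--     A_rows = [list(a) + [0] * offsets[i] + blocks[i][0] + [0] * (total - offsets[i + 1])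
--               for i, (a, _, _) in enumerate(constraints)]
--     b = [bi for (_, _, bi) in constraints]
--     c_ext = list(coeffs) + [0] * total
--     col_types = ['orig'] * len(coeffs) + [t for _, ts in blocks for t in ts]
--     return A_rows, b, c_ext, col_types
-- ===== Notes on version B (the rewrite author's own statement) =====
-- stated objective: alternative
-- what changed: Replaces A's column-major construction (appending one extra-column entry to every row per constraint, with an inner loop over all rows per column) by a block-diagonal construction: each constraint yields a small sign block ([1], [-1,1] or [1]), prefix-sum offsets locate each block, and every row tail is emitted in one go as zero padding / own block / zero padding, with no cross-row inner loop.
import Mathlib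
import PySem

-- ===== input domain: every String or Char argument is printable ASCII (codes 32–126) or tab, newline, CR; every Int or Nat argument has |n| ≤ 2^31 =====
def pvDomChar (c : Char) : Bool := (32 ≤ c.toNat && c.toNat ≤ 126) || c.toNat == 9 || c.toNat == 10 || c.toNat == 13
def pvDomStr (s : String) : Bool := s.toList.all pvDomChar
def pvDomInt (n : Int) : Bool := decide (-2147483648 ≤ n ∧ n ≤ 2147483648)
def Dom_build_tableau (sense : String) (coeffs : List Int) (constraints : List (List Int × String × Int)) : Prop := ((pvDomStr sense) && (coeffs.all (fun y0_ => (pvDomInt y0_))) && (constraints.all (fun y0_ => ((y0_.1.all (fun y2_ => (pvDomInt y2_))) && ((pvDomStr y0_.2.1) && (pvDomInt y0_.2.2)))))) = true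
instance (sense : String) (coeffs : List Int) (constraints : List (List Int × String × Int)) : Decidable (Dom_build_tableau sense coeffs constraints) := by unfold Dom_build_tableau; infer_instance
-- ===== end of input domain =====

-- B replaces A's column-major appending by a block-diagonal construction:
-- per-constraint sign blocks placed via prefix-sum offsets, each row tail emitted
-- as zeros / own block / zeros (objective: alternative, same cost).

-- ===== PORT A =====
-- for r in range(len_constrains): A_rows[r].append(v if r == i else 0)
def pvAddCol (rows : List (List Int)) (i : Int) (v : Int) : List (List Int) :=
  rows.mapIdx (fun r row => row ++ [if (r : Int) = i then v else 0])

-- one iteration of A's second loop, over (i, (a, rel, bi)), state (A_rows, col_types)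
def pvStepA (st : List (List Int) × List String) (ic : Int × (List Int × String × Int)) :
    List (List Int) × List String :=
  if ic.2.2.1 = "<=" then (pvAddCol st.1 ic.1 1, st.2 ++ ["slack"])
  else if ic.2.2.1 = ">=" then (pvAddCol (pvAddCol st.1 ic.1 (-1)) ic.1 1, st.2 ++ ["surplus", "art"])
  else if ic.2.2.1 = "=" then (pvAddCol st.1 ic.1 1, st.2 ++ ["art"])
  else st

def build_tableau (sense : String) (coeffs : List Int) (constraints : List (List Int × String × Int)) : List (List Int) × List Int × List Int × List String :=
  let c := coeffs.map (fun ci => ci)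
  let constr := constraints.map (fun t => (t.1.map (fun x => x), t.2.1, t.2.2))
  let len_coeffs := c.length
  let A_rows0 := constr.map (fun t => t.1)
  let b := constr.map (fun t => t.2.2)
  let st := (PySem.List.enumerate constr 0).foldl pvStepA (A_rows0, [])
  let col_types := List.replicate len_coeffs "orig" ++ st.2
  let c_ext := c ++ (List.range (col_types.length - len_coeffs)).map (fun _ => (0 : Int))
  (st.1, b, c_ext, col_types)

-- ===== PORT B =====
-- def block(rel): the sign block and column types contributed by one constraint
def pvBlock (rel : String) : List Int × List String :=
  if rel = "<=" then ([1], ["slack"])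
  else if rel = ">=" then ([-1, 1], ["surplus", "art"])
  else if rel = "=" then ([1], ["art"])
  else ([], [])

def build_tableau_alt (sense : String) (coeffs : List Int) (constraints : List (List Int × String × Int)) : List (List Int) × List Int × List Int × List String :=
  let blocks := constraints.map (fun t => pvBlock t.2.1)
  -- offsets.append(offsets[-1] + len(sgns)); offsets starts [0] so is never empty,
  -- hence getLastD 0 is exactly Python's offsets[-1]
  let offsets := blocks.foldl (fun acc bl => acc ++ [acc.getLastD 0 + bl.1.length]) [0]
  let total := offsets.getLastD 0
  -- enumerate indices are the nonnegative 0..m-1, so .toNat is exact here, and the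
  -- list indexing offsets[i], offsets[i+1], blocks[i] is always in range (getD exact)
  let A_rows := (PySem.List.enumerate constraints 0).map (fun ic =>
      ic.2.1.map (fun x => x)
        ++ List.replicate (offsets.getD ic.1.toNat 0) (0 : Int)
        ++ (blocks.getD ic.1.toNat ([], [])).1
        ++ List.replicate (total - offsets.getD (ic.1.toNat + 1) 0) (0 : Int))
  let b := constraints.map (fun t => t.2.2)
  let c_ext := coeffs.map (fun ci => ci) ++ List.replicate total (0 : Int)
  let col_types := List.replicate coeffs.length "orig" ++ blocks.flatMap (fun bl => bl.2)
  (A_rows, b, c_ext, col_types)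

-- ===== PRECONDITION & SPEC =====
def Spec_build_tableau (sense : String) (coeffs : List Int) (constraints : List (List Int × String × Int)) (out : List (List Int) × List Int × List Int × List String) : Prop := out = build_tableau_alt sense coeffs constraints
instance (sense : String) (coeffs : List Int) (constraints : List (List Int × String × Int)) (out : List (List Int) × List Int × List Int × List String) : Decidable (Spec_build_tableau sense coeffs constraints out) := by unfold Spec_build_tableau; infer_instance

-- ===== CLAIM (what is proved, stated in full; the proofs are below) =====
def Claim_equal_build_tableau : Prop := ∀ (sense : String) (coeffs : List Int) (constraints : List (List Int × String × Int)), Dom_build_tableau sense coeffs constraints → Spec_build_tableau sense coeffs constraints (build_tableau sense coeffs constraints)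

-- ===== LEMMAS AND PROOFS =====

-- extra-column entries contributed to row r by one enumerated constraint (A side)
def pvCols (r : Int) (ic : Int × (List Int × String × Int)) : List Int :=
  if ic.2.2.1 = "<=" then [if r = ic.1 then 1 else 0]
  else if ic.2.2.1 = ">=" then [if r = ic.1 then -1 else 0, if r = ic.1 then 1 else 0]
  else if ic.2.2.1 = "=" then [if r = ic.1 then 1 else 0]
  else []

def pvTypes1 (ic : Int × (List Int × String × Int)) : List String :=
  if ic.2.2.1 = "<=" then ["slack"]
  else if ic.2.2.1 = ">=" then ["surplus", "art"]
  else if ic.2.2.1 = "=" then ["art"]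
  else []

-- width of one constraint's extra-column block
def pvWid (t : List Int × String × Int) : Nat := (pvBlock t.2.1).1.length

theorem mapIdx_mapIdx' {α β γ : Type} (l : List α) (f : Nat → α → β) (g : Nat → β → γ) :
    (l.mapIdx f).mapIdx g = l.mapIdx (fun i x => g i (f i x)) := by
  apply List.ext_getElem <;> simp

theorem mapIdx_id' {α : Type} (l : List α) : l.mapIdx (fun _ x => x) = l := by
  apply List.ext_getElem <;> simp

theorem stepA_eq (st : List (List Int) × List String) (ic : Int × (List Int × String × Int)) :
    pvStepA st ic = (st.1.mapIdx (fun r row => row ++ pvCols r ic), st.2 ++ pvTypes1 ic) := by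
  unfold pvStepA pvCols pvTypes1 pvAddCol
  split_ifs <;>
    (refine Prod.ext ?_ (by simp); apply List.ext_getElem <;> simp)

theorem foldA_eq (l : List (Int × (List Int × String × Int)))
    (rows : List (List Int)) (ct : List String) :
    l.foldl pvStepA (rows, ct) =
      (rows.mapIdx (fun r row => row ++ l.flatMap (pvCols r)), ct ++ l.flatMap pvTypes1) := by
  induction l generalizing rows ct with
  | nil => simp [mapIdx_id']
  | cons x l ih =>
    simp only [List.foldl_cons, stepA_eq, ih, mapIdx_mapIdx', List.flatMap_cons,
      List.append_assoc]

-- pvCols on its own row are the block's signs; on another row, zeros of block width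
theorem cols_self (i : Int) (t : List Int × String × Int) :
    pvCols i (i, t) = (pvBlock t.2.1).1 := by
  unfold pvCols pvBlock; split_ifs <;> simp_all

theorem cols_other (r i : Int) (t : List Int × String × Int) (h : r ≠ i) :
    pvCols r (i, t) = List.replicate (pvWid t) (0 : Int) := by
  unfold pvCols pvWid pvBlock; split_ifs <;> simp [h]

theorem types1_eq (ic : Int × (List Int × String × Int)) :
    pvTypes1 ic = (pvBlock ic.2.2.1).2 := by
  unfold pvTypes1 pvBlock; split_ifs <;> rfl

-- flatMap over all-later constraints is all zeros
theorem flatMap_cols_zero (cs : List (List Int × String × Int)) (k r : Int) (h : r < k) :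
    (PySem.List.enumerate cs k).flatMap (pvCols r)
      = List.replicate ((cs.map pvWid).sum) (0 : Int) := by
  induction cs generalizing k with
  | nil => simp [PySem.List.enumerate]
  | cons c cs ih =>
    rw [PySem.List.enumerate_cons]
    simp only [List.flatMap_cons, List.map_cons, List.sum_cons]
    rw [cols_other r k c (by omega), ih (k + 1) (by omega), List.replicate_add]

theorem flatMap_cols_main (cs : List (List Int × String × Int)) (k : Int) (r : Nat)
    (h : r < cs.length) :
    (PySem.List.enumerate cs k).flatMap (pvCols (k + r))
      = List.replicate (((cs.take r).map pvWid).sum) (0 : Int)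
        ++ (pvBlock (cs[r].2.1)).1
        ++ List.replicate (((cs.drop (r + 1)).map pvWid).sum) (0 : Int) := by
  induction cs generalizing k r with
  | nil => simp at h
  | cons c cs ih =>
    rw [PySem.List.enumerate_cons]
    cases r with
    | zero =>
      simp only [List.flatMap_cons, Nat.cast_zero, add_zero, List.take_zero, List.map_nil,
        List.sum_nil, List.replicate_zero, List.nil_append, List.getElem_cons_zero,
        List.drop_succ_cons, List.drop_zero]
      rw [cols_self k c, flatMap_cols_zero cs (k + 1) k (by omega)]
    | succ r =>
      simp only [List.flatMap_cons, List.take_succ_cons, List.map_cons, List.sum_cons,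
        List.getElem_cons_succ, List.drop_succ_cons]
      rw [cols_other (k + (r + 1 : Nat)) k c (by push_cast; omega), List.replicate_add]
      have := ih (k + 1) r (by simpa using h)
      rw [show (k + ((r : Nat) + 1 : Nat) : Int) = (k + 1) + (r : Nat) by push_cast; ring] at *
      rw [this]
      simp only [List.append_assoc]

-- the offsets fold yields prefix sums of the block widths
theorem fold_off (bs : List (List Int × List String)) (acc : List Nat) (x : Nat) :
    bs.foldl (fun acc bl => acc ++ [acc.getLastD 0 + bl.1.length]) (acc ++ [x])
      = acc ++ (List.range (bs.length + 1)).map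
          (fun i => x + ((bs.take i).map (fun bl => bl.1.length)).sum) := by
  induction bs generalizing acc x with
  | nil => simp
  | cons b bs ih =>
    rw [List.foldl_cons]
    have h1 : (acc ++ [x]).getLastD 0 = x := by simp
    rw [h1, ih (acc ++ [x]) (x + b.1.length), List.append_assoc]
    congr 1
    apply List.ext_getElem
    · simp
    · intro i h1 h2
      match i with
      | 0 => simp
      | i + 1 =>
        simp [List.getElem_append, List.take_succ_cons, add_assoc]

theorem offs_getD (bs : List (List Int × List String)) (i : Nat) (h : i ≤ bs.length) :
    ((bs.foldl (fun acc bl => acc ++ [acc.getLastD 0 + bl.1.length]) [0]).getD i 0)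
      = ((bs.take i).map (fun bl => bl.1.length)).sum := by
  rw [show ([0] : List Nat) = [] ++ [0] from rfl, fold_off bs [] 0]
  rw [List.nil_append, List.getD_eq_getElem?_getD, List.getElem?_map,
    List.getElem?_range (by omega)]
  simp

theorem offs_getLastD (bs : List (List Int × List String)) :
    ((bs.foldl (fun acc bl => acc ++ [acc.getLastD 0 + bl.1.length]) [0]).getLastD 0)
      = (bs.map (fun bl => bl.1.length)).sum := by
  rw [show ([0] : List Nat) = [] ++ [0] from rfl, fold_off bs [] 0]
  rw [List.nil_append, List.range_succ, List.map_append]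
  have h : List.take bs.length (List.map (fun bl => bl.1.length) bs)
      = List.map (fun bl => bl.1.length) bs := List.take_of_length_le (by simp)
  simp [h]

theorem map_pvWid (l : List (List Int × String × Int)) :
    l.map pvWid = l.map (fun t => (pvBlock t.2.1).1.length) := rfl

-- one output row of A equals the corresponding padded row of B
theorem row_eq (cs : List (List Int × String × Int)) (r : Nat) (hr : r < cs.length) :
    cs[r].1 ++ (PySem.List.enumerate cs 0).flatMap (pvCols (r : Nat)) =
      cs[r].1
        ++ List.replicate (((cs.map (fun t => pvBlock t.2.1)).foldl
              (fun acc bl => acc ++ [acc.getLastD 0 + bl.1.length]) [0]).getD r 0) (0 : Int)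
        ++ ((cs.map (fun t => pvBlock t.2.1)).getD r ([], [])).1
        ++ List.replicate ((((cs.map (fun t => pvBlock t.2.1)).foldl
              (fun acc bl => acc ++ [acc.getLastD 0 + bl.1.length]) [0]).getLastD 0)
            - (((cs.map (fun t => pvBlock t.2.1)).foldl
              (fun acc bl => acc ++ [acc.getLastD 0 + bl.1.length]) [0]).getD (r + 1) 0)) (0 : Int) := by
  have hm := flatMap_cols_main cs 0 r hr
  rw [zero_add] at hm
  rw [hm]
  rw [offs_getD _ r (by simpa using Nat.le_of_lt hr),
    offs_getD _ (r + 1) (by simpa using hr),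
    offs_getLastD]
  rw [List.getD_eq_getElem?_getD, List.getElem?_map, List.getElem?_eq_getElem hr]
  simp only [Option.map_some, Option.getD_some]
  have htd : ((cs.map (fun t => pvBlock t.2.1)).map (fun bl => bl.1.length)).sum
        - (((cs.map (fun t => pvBlock t.2.1)).take (r + 1)).map
            (fun bl => bl.1.length)).sum
      = ((cs.drop (r + 1)).map pvWid).sum := by
    have hs := List.sum_take_add_sum_drop
      ((cs.map (fun t => pvBlock t.2.1)).map (fun bl => bl.1.length)) (r + 1)
    simp only [← List.map_take, ← List.map_drop, List.map_map, Function.comp_def,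
      map_pvWid] at hs ⊢
    omega
  rw [htd]
  have hts : ((cs.take r).map (fun t => pvBlock t.2.1)).map (fun bl => bl.1.length)
      = (cs.take r).map pvWid := by
    simp [← List.map_take, Function.comp_def, map_pvWid]
  rw [← List.map_take, hts]
  simp [List.append_assoc]

-- index-independent flatMap over enumerate
theorem flatMap_enumerate_snd {α β : Type} (l : List α) (k : Int) (g : α → List β) :
    (PySem.List.enumerate l k).flatMap (fun ic => g ic.2) = l.flatMap g := by
  induction l generalizing k with
  | nil => simp [PySem.List.enumerate]
  | cons x l ih => rw [PySem.List.enumerate_cons]; simp [ih]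

-- each block has as many types as signs
theorem block_len (rel : String) : (pvBlock rel).2.length = (pvBlock rel).1.length := by
  unfold pvBlock; split_ifs <;> rfl

theorem types_len (cs : List (List Int × String × Int)) :
    ((cs.map (fun t => pvBlock t.2.1)).flatMap (fun bl => bl.2)).length
      = (cs.map pvWid).sum := by
  induction cs with
  | nil => rfl
  | cons c cs ih => simp [pvWid, block_len, ih]

-- ===== VERDICT (by name: the statement is the Claim_ definition above) =====
theorem build_tableau_spec : Claim_equal_build_tableau := by
  intro sense coeffs constraints _
  show build_tableau sense coeffs constraints = build_tableau_alt sense coeffs constraints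
  unfold build_tableau build_tableau_alt
  simp only [foldA_eq, List.map_id']
  have hT : (PySem.List.enumerate constraints 0).flatMap pvTypes1
      = (constraints.map (fun t => pvBlock t.2.1)).flatMap (fun bl => bl.2) := by
    rw [show (PySem.List.enumerate constraints 0).flatMap pvTypes1
        = (PySem.List.enumerate constraints 0).flatMap
            (fun ic => (pvBlock ic.2.2.1).2) from
      List.flatMap_congr (fun ic _ => types1_eq ic)]
    rw [flatMap_enumerate_snd constraints 0 (fun t => (pvBlock t.2.1).2)]
    simp [List.flatMap_map]
  refine congrArg₂ Prod.mk ?_ (congrArg₂ Prod.mk rfl (congrArg₂ Prod.mk ?_ ?_))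
  · -- rows
    apply List.ext_getElem
    · simp
    · intro r h1 h2
      simp only [List.getElem_mapIdx, List.getElem_map, PySem.List.getElem_enumerate]
      have hr : r < constraints.length := by simpa using h1
      rw [show ((0 : Int) + (r : Nat)).toNat = r by omega]
      exact row_eq constraints r hr
  · -- c_ext
    congr 1
    rw [List.map_const']
    congr 1
    simp only [List.nil_append, List.length_append, List.length_replicate, hT,
      List.length_range]
    rw [types_len, offs_getLastD]
    simp only [List.map_map, Function.comp_def, map_pvWid]
    omega
  · -- col_types
    simp only [List.nil_append, hT]
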